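-- pv_equiv track=rewrite | github.com/miskamvedebel/algorithms | greedy/money_in_bank.py | money_in_bank
-- ===== SOURCE A (Python) =====
-- def money_in_bank(n):
--     '''returns money in bank after n days. considering mondays
--     '''
--     if n <= 1:
--         return n
--     total = 1
--     prev = 1
--     for i in range(2, n + 1):
--         if i % 7 == 1:
--             prev = i // 7
--         curr = prev + 1
--         total += curr
--         prev = curr
--
--     return total
-- ===== SOURCE B (Python) =====
-- def money_in_bank(n):
--     if n <= 1:
--         return n
--     k, r = divmod(n, 7)
--     return 28 * k + 7 * k * (k - 1) // 2 + r * k + r * (r + 1) // 2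
-- ===== Notes on version B (the rewrite author's own statement) =====
-- stated objective: faster
-- what changed: Replaces the day-by-day simulation loop with an O(1) closed-form formula: divmod(n,7) splits n into full weeks and a partial week, summed with arithmetic-series formulas.
import Mathlib
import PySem

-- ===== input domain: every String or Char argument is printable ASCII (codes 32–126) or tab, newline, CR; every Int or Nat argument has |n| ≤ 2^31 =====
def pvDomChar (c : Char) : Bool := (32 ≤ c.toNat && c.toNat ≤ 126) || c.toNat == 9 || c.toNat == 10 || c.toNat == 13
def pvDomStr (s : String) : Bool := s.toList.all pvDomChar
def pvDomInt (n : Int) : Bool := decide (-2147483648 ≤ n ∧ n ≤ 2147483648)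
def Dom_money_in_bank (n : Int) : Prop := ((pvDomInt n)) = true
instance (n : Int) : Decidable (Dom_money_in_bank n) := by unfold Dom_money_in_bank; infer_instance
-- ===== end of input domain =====

-- B replaces A's day-by-day O(n) loop by an O(1) closed-form arithmetic-series sum over full weeks plus the partial week.

-- ===== PORT A =====
def money_in_bank (n : Int) : Int :=
  if n ≤ 1 then n
  else
    ((PySem.List.pyRange 2 (n + 1) 1).foldl
      (fun (st : Int × Int) i =>
        let prev := if PySem.Int.mod i 7 == 1 then PySem.Int.floordiv i 7 else st.2
        (st.1 + (prev + 1), prev + 1)) ((1 : Int), (1 : Int))).1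

-- ===== PORT B =====
def money_in_bank_alt (n : Int) : Int :=
  if n ≤ 1 then n
  else
    let k := PySem.Int.floordiv n 7
    let r := PySem.Int.mod n 7
    28 * k + PySem.Int.floordiv (7 * k * (k - 1)) 2 + r * k
      + PySem.Int.floordiv (r * (r + 1)) 2

-- ===== PRECONDITION & SPEC =====
def Spec_money_in_bank (n : Int) (out : Int) : Prop := out = money_in_bank_alt n
instance (n : Int) (out : Int) : Decidable (Spec_money_in_bank n out) := by unfold Spec_money_in_bank; infer_instance

-- ===== CLAIM (what is proved, stated in full; the proofs are below) =====
def Claim_equal_money_in_bank : Prop := ∀ (n : Int), Dom_money_in_bank n → Spec_money_in_bank n (money_in_bank n)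

-- ===== LEMMAS AND PROOFS =====

/-- Closed-form total after day `d` (ediv/emod form, proof helper). -/
def pvPhi (d : Int) : Int :=
  28 * (d / 7) + (7 * (d / 7) * (d / 7 - 1)) / 2 + (d % 7) * (d / 7) + ((d % 7) * (d % 7 + 1)) / 2

/-- Deposit made on day `d` (proof helper). -/
def pvG (d : Int) : Int := (d - 1) / 7 + (d - 1) % 7 + 1

lemma pv_tri_succ (r : Int) : ((r + 1) * (r + 1 + 1)) / 2 = (r * (r + 1)) / 2 + (r + 1) := by
  have h : (r + 1) * (r + 1 + 1) = r * (r + 1) + (r + 1) * 2 := by ring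
  rw [h, Int.add_mul_ediv_right _ _ (by norm_num : (2:Int) ≠ 0)]

lemma pv_tri7_succ (k : Int) : (7 * (k + 1) * (k + 1 - 1)) / 2 = (7 * k * (k - 1)) / 2 + 7 * k := by
  have h : 7 * (k + 1) * (k + 1 - 1) = 7 * k * (k - 1) + (7 * k) * 2 := by ring
  rw [h, Int.add_mul_ediv_right _ _ (by norm_num : (2:Int) ≠ 0)]

lemma pv_g_step (j : Int) :
    (if (2 + j) % 7 = 1 then (2 + j) / 7 else pvG (j + 1)) + 1 = pvG (j + 2) := by
  unfold pvG
  split_ifs with h <;> omega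

lemma pv_phi_step (j : Int) : pvPhi (j + 1) + pvG (j + 2) = pvPhi (j + 2) := by
  unfold pvPhi pvG
  have e1 : j + 2 - 1 = j + 1 := by ring
  rw [e1]
  have hkr : 7 * ((j + 1) / 7) + (j + 1) % 7 = j + 1 ∧ 0 ≤ (j + 1) % 7 ∧ (j + 1) % 7 < 7 := by omega
  set k := (j + 1) / 7 with hk
  set r := (j + 1) % 7 with hr
  by_cases h6 : r = 6
  · have h2 : (j + 2) / 7 = k + 1 ∧ (j + 2) % 7 = 0 := by omega
    rw [h2.1, h2.2, h6, pv_tri7_succ]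
    norm_num
    ring
  · have h2 : (j + 2) / 7 = k ∧ (j + 2) % 7 = r + 1 := by omega
    rw [h2.1, h2.2, pv_tri_succ]
    ring

lemma pv_fold (m : Nat) :
    (PySem.List.pyRange 2 (2 + (m : Int)) 1).foldl
      (fun (st : Int × Int) i =>
        let prev := if PySem.Int.mod i 7 == 1 then PySem.Int.floordiv i 7 else st.2
        (st.1 + (prev + 1), prev + 1)) ((1 : Int), (1 : Int))
    = (pvPhi ((m : Int) + 1), pvG ((m : Int) + 1)) := by
  induction m with
  | zero =>
    rw [PySem.List.pyRange_one_eq_nil (by norm_num)]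
    simp [pvPhi, pvG]
  | succ m ih =>
    have hcast : (2 : Int) + ((m + 1 : Nat) : Int) = (2 + (m : Int)) + 1 := by push_cast; ring
    rw [hcast, PySem.List.pyRange_one_succ_right (by omega), List.foldl_append, ih]
    simp only [List.foldl_cons, List.foldl_nil]
    have hm : (0 : Int) ≤ (m : Int) := Int.natCast_nonneg m
    rw [PySem.Int.mod_eq_emod_of_pos (by norm_num : (0:Int) < 7),
        PySem.Int.floordiv_eq_ediv_of_pos (by norm_num : (0:Int) < 7)]
    have hg := pv_g_step (m : Int)
    have hp := pv_phi_step (m : Int)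
    have hcast2 : ((m + 1 : Nat) : Int) = (m : Int) + 1 := by push_cast; ring
    rw [hcast2]
    simp only [beq_iff_eq]
    have e2 : ((m : Int) + 1 + 1) = (m : Int) + 2 := by ring
    rw [e2, Prod.mk.injEq]
    exact ⟨by rw [← hp, ← hg], hg⟩

lemma pv_alt_phi (n : Int) (hn : ¬ n ≤ 1) : money_in_bank_alt n = pvPhi n := by
  unfold money_in_bank_alt pvPhi
  rw [if_neg hn]
  simp only [PySem.Int.mod_eq_emod_of_pos (by norm_num : (0:Int) < 7),
      PySem.Int.floordiv_eq_ediv_of_pos (by norm_num : (0:Int) < 7),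
      PySem.Int.floordiv_eq_ediv_of_pos (by norm_num : (0:Int) < 2)]

-- ===== VERDICT (by name: the statement is the Claim_ definition above) =====
theorem money_in_bank_spec : Claim_equal_money_in_bank := by
  intro n _
  unfold Spec_money_in_bank
  by_cases hn : n ≤ 1
  · simp [money_in_bank, money_in_bank_alt, hn]
  · have hm : (2 : Int) + ((n - 1).toNat : Int) = n + 1 := by omega
    have := pv_fold (n - 1).toNat
    rw [hm] at this
    have hmn : ((n - 1).toNat : Int) + 1 = n := by omega
    rw [hmn] at this
    rw [money_in_bank, if_neg hn, this, pv_alt_phi n hn]
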